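-- pv_equiv track=rewrite | github.com/avinashraz19818/maxie1min | persnl_bot.py | identify_pattern_type
-- ===== SOURCE A (Python) =====
-- def identify_pattern_type(pattern):
--     """Identify type of pattern"""
--     pattern = list(pattern)
--
--     # Check for alternating pattern
--     alternating = True
--     for i in range(1, len(pattern)):
--         if pattern[i] == pattern[i-1]:
--             alternating = False
--             break
--
--     if alternating:
--         return 'alternating'
--
--     # Check for streak
--     streak_count = 1
--     max_streak = 1
--     for i in range(1, len(pattern)):
--         if pattern[i] == pattern[i-1]:
--             streak_count += 1
--             max_streak = max(max_streak, streak_count)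
--         else:
--             streak_count = 1
--
--     if max_streak >= 3:
--         return 'streak'
--
--     # Check for zigzag (small alternating with occasional same)
--     changes = sum(1 for i in range(1, len(pattern)) if pattern[i] != pattern[i-1])
--     if changes >= len(pattern) * 0.7:
--         return 'zigzag'
--
--     # Check for clusters
--     clusters = 0
--     in_cluster = False
--     for i in range(1, len(pattern)):
--         if pattern[i] == pattern[i-1] and not in_cluster:
--             clusters += 1
--             in_cluster = True
--         elif pattern[i] != pattern[i-1]:
--             in_cluster = False
--
--     if clusters >= 2:
--         return 'cluster'
--
--     return 'random'
-- ===== SOURCE B (Python) =====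
-- def identify_pattern_type(pattern):
--     """Identify type of pattern (run-length decomposition: one pass builds the
--     run lengths, every metric of the decision cascade is derived from them)."""
--     pattern = list(pattern)
--     runs = []
--     if pattern:
--         cnt = 1
--         for i in range(1, len(pattern)):
--             if pattern[i] == pattern[i - 1]:
--                 cnt += 1
--             else:
--                 runs.append(cnt)
--                 cnt = 1
--         runs.append(cnt)
--
--     if all(r == 1 for r in runs):
--         return 'alternating'
--     if max(runs) >= 3:
--         return 'streak'
--     if len(runs) - 1 >= len(pattern) * 0.7:
--         return 'zigzag'
--     if sum(1 for r in runs if r >= 2) >= 2: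
--         return 'cluster'
--     return 'random'
-- ===== Notes on version B (the rewrite author's own statement) =====
-- stated objective: alternative
-- what changed: A's four separate scans of the sequence (alternating check, streak scan, change count, cluster scan with a flag) are replaced by one run-length pass; all four metrics (all runs = 1, max run, #runs - 1, #runs >= 2) are derived from the run lengths and fed to the same ordered decision cascade.
import Mathlib
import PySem

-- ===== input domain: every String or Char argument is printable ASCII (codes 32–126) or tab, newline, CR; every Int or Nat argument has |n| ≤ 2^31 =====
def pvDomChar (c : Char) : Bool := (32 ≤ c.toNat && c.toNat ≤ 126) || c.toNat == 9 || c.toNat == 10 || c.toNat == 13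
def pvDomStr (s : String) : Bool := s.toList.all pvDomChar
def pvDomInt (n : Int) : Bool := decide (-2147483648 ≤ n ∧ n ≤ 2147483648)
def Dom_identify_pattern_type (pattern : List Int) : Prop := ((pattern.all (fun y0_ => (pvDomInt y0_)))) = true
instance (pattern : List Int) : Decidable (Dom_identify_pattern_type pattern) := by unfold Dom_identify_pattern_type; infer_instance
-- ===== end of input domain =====

-- B replaces A's four separate scans (alternating / streak / changes / clusters) by one
-- run-length pass from which all four metrics are derived; same ordered decision cascade.

-- Exact model of Python's `c >= n * 0.7` for nonnegative ints c, n: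
-- 0.7 as an IEEE double is 3152519739159347 / 2^52; the product n*0.7 is that exact
-- product rounded to 53 significant bits (round-to-nearest, ties to even), and the
-- int-float comparison is exact. Shared by both ports (both Pythons contain this line).
def pyGe70 (c n : Nat) : Bool :=
  let p := n * 3152519739159347
  if p = 0 then true
  else
    let k := p.log2 + 1
    if k ≤ 53 then decide (p ≤ c * 2 ^ 52)
    else
      let sh := k - 53
      let q := p >>> sh
      let rem := p - (q <<< sh)
      let half := 1 <<< (sh - 1)
      let r := if half < rem ∨ (rem = half ∧ q % 2 = 1) then q + 1 else q
      decide (r <<< sh ≤ c * 2 ^ 52)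

-- ===== PORT A =====
-- the `alternating` loop with its early break
def altCheck (prev : Int) : List Int → Bool
  | [] => true
  | y :: ys => if y = prev then false else altCheck y ys

-- the streak loop: state (streak_count, max_streak)
def streakAux (prev : Int) (sc ms : Nat) : List Int → Nat
  | [] => ms
  | y :: ys => if y = prev then streakAux y (sc + 1) (Nat.max ms (sc + 1)) ys
               else streakAux y 1 ms ys

-- changes = sum(1 for i in range(1,len) if pattern[i] != pattern[i-1])
def changesAux (prev : Int) : List Int → Nat
  | [] => 0
  | y :: ys => (if y ≠ prev then 1 else 0) + changesAux y ys

-- the cluster loop: state (in_cluster, clusters)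
def clustAux (prev : Int) (inCluster : Bool) (c : Nat) : List Int → Nat
  | [] => c
  | y :: ys =>
      if y = prev then
        if inCluster then clustAux y true c ys else clustAux y true (c + 1) ys
      else clustAux y false c ys

def identify_pattern_type (pattern : List Int) : String :=
  match pattern with
  | [] => "alternating"
  | x :: xs =>
      if altCheck x xs then "alternating"
      else if 3 ≤ streakAux x 1 1 xs then "streak"
      else if pyGe70 (changesAux x xs) (xs.length + 1) then "zigzag"
      else if 2 ≤ clustAux x false 0 xs then "cluster"
      else "random"

-- ===== PORT B =====
-- B's single run-length pass: cnt is the current run's length, emitted on each change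
-- and once at the end.
def runsAux (prev : Int) (cnt : Nat) : List Int → List Nat
  | [] => [cnt]
  | y :: ys => if y = prev then runsAux y (cnt + 1) ys else cnt :: runsAux y 1 ys

def identify_pattern_type_alt (pattern : List Int) : String :=
  let runs : List Nat := match pattern with
    | [] => []
    | x :: xs => runsAux x 1 xs
  if runs.all (· = 1) then "alternating"
  else if 3 ≤ runs.foldr Nat.max 0 then "streak"       -- max(runs); runs ≠ [] here
  else if pyGe70 (runs.length - 1) pattern.length then "zigzag"
  else if 2 ≤ runs.countP (fun r => decide (2 ≤ r)) then "cluster"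
  else "random"

-- ===== PRECONDITION & SPEC =====
def Spec_identify_pattern_type (pattern : List Int) (out : String) : Prop := out = identify_pattern_type_alt pattern
instance (pattern : List Int) (out : String) : Decidable (Spec_identify_pattern_type pattern out) := by unfold Spec_identify_pattern_type; infer_instance

-- ===== CLAIM (what is proved, stated in full; the proofs are below) =====
def Claim_equal_identify_pattern_type : Prop := ∀ (pattern : List Int), Dom_identify_pattern_type pattern → Spec_identify_pattern_type pattern (identify_pattern_type pattern)

-- ===== LEMMAS AND PROOFS =====

lemma runsAux_cons_self (prev : Int) (cnt : Nat) (ys : List Int) :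
    runsAux prev cnt (prev :: ys) = runsAux prev (cnt + 1) ys := by simp [runsAux]

lemma runsAux_cons_ne {y prev : Int} (h : y ≠ prev) (cnt : Nat) (ys : List Int) :
    runsAux prev cnt (y :: ys) = cnt :: runsAux y 1 ys := by simp [runsAux, h]

-- every run list emitted by runsAux contains an element ≥ cnt
lemma runsAux_exists_ge (prev : Int) (cnt : Nat) (xs : List Int) :
    ∃ r ∈ runsAux prev cnt xs, cnt ≤ r := by
  induction xs generalizing prev cnt with
  | nil => exact ⟨cnt, by simp [runsAux]⟩
  | cons y ys ih =>
      by_cases h : y = prev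
      · subst h
        obtain ⟨r, hr, hle⟩ := ih y (cnt + 1)
        exact ⟨r, by rw [runsAux_cons_self]; exact hr, by omega⟩
      · exact ⟨cnt, by simp [runsAux_cons_ne h], le_refl _⟩

lemma runsAux_ne_nil (prev : Int) (cnt : Nat) (xs : List Int) :
    runsAux prev cnt xs ≠ [] := by
  induction xs generalizing prev cnt with
  | nil => simp [runsAux]
  | cons y ys ih => by_cases h : y = prev <;> simp [runsAux, h, ih]

lemma le_foldr_max_of_mem {r : Nat} {xs : List Nat} (h : r ∈ xs) :
    r ≤ xs.foldr Nat.max 0 := by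
  induction xs with
  | nil => cases h
  | cons a as ih =>
      rcases List.mem_cons.1 h with h | h
      · simp [h]
      · exact le_trans (ih h) (by simp [List.foldr])

lemma altCheck_eq (prev : Int) (xs : List Int) :
    altCheck prev xs = (runsAux prev 1 xs).all (· = 1) := by
  induction xs generalizing prev with
  | nil => simp [altCheck, runsAux]
  | cons y ys ih =>
      by_cases h : y = prev
      · subst h
        rw [runsAux_cons_self]
        obtain ⟨r, hr, hle⟩ := runsAux_exists_ge y (1 + 1) ys
        have hf : (runsAux y (1 + 1) ys).all (· = 1) = false := by
          rw [List.all_eq_false]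
          exact ⟨r, hr, by simp; omega⟩
        rw [hf]
        simp [altCheck]
      · simp [altCheck, runsAux, h, ih]

lemma streakAux_eq (prev : Int) (sc ms : Nat) (xs : List Int)
    (hsc : 1 ≤ sc) (hms : sc ≤ ms) :
    streakAux prev sc ms xs = Nat.max ms ((runsAux prev sc xs).foldr Nat.max 0) := by
  induction xs generalizing prev sc ms with
  | nil =>
      simp only [streakAux, runsAux, List.foldr, Nat.max_def]
      split_ifs <;> omega
  | cons y ys ih =>
      by_cases h : y = prev
      · subst h
        have hstep : streakAux y sc ms (y :: ys)
            = streakAux y (sc + 1) (Nat.max ms (sc + 1)) ys := by simp [streakAux]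
        rw [hstep, runsAux_cons_self,
            ih y (sc + 1) (Nat.max ms (sc + 1)) (by omega) (Nat.le_max_right ms (sc + 1))]
        obtain ⟨r, hr, hle⟩ := runsAux_exists_ge y (sc + 1) ys
        have h2 := le_foldr_max_of_mem hr
        simp only [Nat.max_def]; split_ifs <;> omega
      · have hstep : streakAux prev sc ms (y :: ys) = streakAux y 1 ms ys := by
          simp [streakAux, h]
        rw [hstep, runsAux_cons_ne h, ih y 1 ms (le_refl 1) (by omega),
            List.foldr_cons]
        simp only [Nat.max_def]; split_ifs <;> omega

lemma changesAux_eq (prev : Int) (cnt : Nat) (xs : List Int) :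
    changesAux prev xs = (runsAux prev cnt xs).length - 1 := by
  induction xs generalizing prev cnt with
  | nil => simp [changesAux, runsAux]
  | cons y ys ih =>
      by_cases h : y = prev
      · subst h
        have hstep : changesAux y (y :: ys) = changesAux y ys := by simp [changesAux]
        rw [hstep, runsAux_cons_self]
        exact ih y (cnt + 1)
      · have hne := runsAux_ne_nil y 1 ys
        have hlen : 1 ≤ (runsAux y 1 ys).length := by
          cases hxe : runsAux y 1 ys with
          | nil => exact absurd hxe hne
          | cons a as => simp
        have hstep : changesAux prev (y :: ys) = 1 + changesAux y ys := by
          simp [changesAux, h]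
        rw [hstep, runsAux_cons_ne h, ih y 1, List.length_cons]
        omega

lemma clustAux_cons_self_true (prev : Int) (c : Nat) (ys : List Int) :
    clustAux prev true c (prev :: ys) = clustAux prev true c ys := by simp [clustAux]

lemma clustAux_cons_self_false (prev : Int) (c : Nat) (ys : List Int) :
    clustAux prev false c (prev :: ys) = clustAux prev true (c + 1) ys := by
  simp [clustAux]

lemma clustAux_cons_ne {y prev : Int} (h : y ≠ prev) (b : Bool) (c : Nat) (ys : List Int) :
    clustAux prev b c (y :: ys) = clustAux y false c ys := by simp [clustAux, h]

lemma clustAux_eq (prev : Int) (cnt : Nat) (c : Nat) (xs : List Int) (hcnt : 1 ≤ cnt) :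
    clustAux prev (decide (2 ≤ cnt)) c xs + (if 2 ≤ cnt then 1 else 0)
      = c + (runsAux prev cnt xs).countP (fun r => decide (2 ≤ r)) := by
  induction xs generalizing prev cnt c with
  | nil =>
      simp only [clustAux, runsAux, List.countP_cons, List.countP_nil,
        decide_eq_true_eq]
      split_ifs <;> omega
  | cons y ys ih =>
      by_cases h : y = prev
      · subst h
        by_cases h2 : 2 ≤ cnt
        · have hb : decide (2 ≤ cnt) = true := by simpa using h2
          have hb' : decide (2 ≤ cnt + 1) = true := by
            simp only [decide_eq_true_eq]; omega
          rw [hb, clustAux_cons_self_true, runsAux_cons_self, if_pos h2]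
          have hih := ih y (cnt + 1) c (by omega)
          rw [hb', if_pos (show 2 ≤ cnt + 1 by omega)] at hih
          omega
        · have hb : decide (2 ≤ cnt) = false := by simpa using h2
          have hb' : decide (2 ≤ cnt + 1) = true := by
            simp only [decide_eq_true_eq]; omega
          rw [hb, clustAux_cons_self_false, runsAux_cons_self, if_neg h2]
          have hih := ih y (cnt + 1) (c + 1) (by omega)
          rw [hb', if_pos (show 2 ≤ cnt + 1 by omega)] at hih
          omega
      · rw [clustAux_cons_ne h, runsAux_cons_ne h, List.countP_cons]
        have hih := ih y 1 c (by omega)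
        rw [show decide (2 ≤ 1) = false from by decide,
            if_neg (by omega : ¬ (2:Nat) ≤ 1)] at hih
        by_cases h2 : 2 ≤ cnt
        · rw [if_pos h2, if_pos (show decide (2 ≤ cnt) = true by simpa using h2)]
          omega
        · rw [if_neg h2, if_neg (show ¬ decide (2 ≤ cnt) = true by simpa using h2)]
          omega

-- ===== VERDICT (by name: the statement is the Claim_ definition above) =====
theorem identify_pattern_type_spec : Claim_equal_identify_pattern_type := by
  intro pattern _
  unfold Spec_identify_pattern_type identify_pattern_type identify_pattern_type_alt
  cases pattern with
  | nil => simp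
  | cons x xs =>
      obtain ⟨r, hr, hr1⟩ := runsAux_exists_ge x 1 xs
      have h1 : 1 ≤ (runsAux x 1 xs).foldr Nat.max 0 :=
        le_trans hr1 (le_foldr_max_of_mem hr)
      have hmax : Nat.max 1 ((runsAux x 1 xs).foldr Nat.max 0)
          = (runsAux x 1 xs).foldr Nat.max 0 := by
        simp only [Nat.max_def]; split_ifs
        omega
      have hcl : clustAux x false 0 xs
          = (runsAux x 1 xs).countP (fun r => decide (2 ≤ r)) := by
        have := clustAux_eq x 1 0 xs (by omega)
        rw [show decide (2 ≤ 1) = false from by decide,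
            if_neg (by omega : ¬ (2:Nat) ≤ 1)] at this
        simpa using this
      simp only [List.length_cons]
      rw [altCheck_eq x xs, streakAux_eq x 1 1 xs (le_refl 1) (le_refl 1),
          changesAux_eq x 1 xs, hcl, hmax]
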